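-- pv_equiv track=rewrite | github.com/womogenes/silent-shitler | agents/cfr/infoset.py | get_player_features
-- ===== SOURCE A (Python) =====
-- def get_player_features(obs, player_idx):
--     """
--     Compute feature vector for a single player based on public history.
--
--     Returns tuple of bucketed features:
--     - fasc_as_prez: # of fascist policies enacted as president (0, 1, 2+)
--     - fasc_as_chanc: # of fascist policies enacted as chancellor (0, 1, 2+)
--     - lib_as_prez: # of liberal policies enacted as president (0, 1, 2+)
--     - lib_as_chanc: # of liberal policies enacted as chancellor (0, 1, 2+)
--     - claim_conflicts: # of claim conflicts involved in (0, 1+)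
--     """
--     fasc_as_prez = 0
--     fasc_as_chanc = 0
--     lib_as_prez = 0
--     lib_as_chanc = 0
--     claim_conflicts = 0
--
--     hist_len = len(obs["hist_president"])
--     for i in range(hist_len):
--         succeeded = obs["hist_succeeded"][i]
--         if succeeded != 1:
--             continue
--
--         prez = obs["hist_president"][i]
--         chanc = obs["hist_chancellor"][i]
--         policy = obs["hist_policy"][i]
--         prez_claim = obs["hist_prez_claim"][i]
--         chanc_claim = obs["hist_chanc_claim"][i]
--
--         # Count policies by role
--         if policy == 1:  # fascist
--             if prez == player_idx:
--                 fasc_as_prez += 1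
--             if chanc == player_idx:
--                 fasc_as_chanc += 1
--         else:  # liberal
--             if prez == player_idx:
--                 lib_as_prez += 1
--             if chanc == player_idx:
--                 lib_as_chanc += 1
--
--         # Check for claim conflicts
--         if prez_claim >= 0 and chanc_claim >= 0:
--             # Prez claims X fascist in 3 cards, discards 1, chanc sees 2
--             # Valid: chanc_claim in [max(0, prez_claim-1), min(2, prez_claim)]
--             expected_min = max(0, prez_claim - 1)
--             expected_max = min(2, prez_claim)
--             if chanc_claim < expected_min or chanc_claim > expected_max:
--                 if prez == player_idx or chanc == player_idx:
--                     claim_conflicts += 1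
--
--     # Bucket the features
--     return (
--         min(fasc_as_prez, 2),
--         min(fasc_as_chanc, 2),
--         min(lib_as_prez, 2),
--         min(lib_as_chanc, 2),
--         min(claim_conflicts, 1),
--     )
-- ===== SOURCE B (Python) =====
-- def get_player_features(obs, player_idx):
--     """
--     Compute feature vector for a single player based on public history.
--     Filter-then-aggregate decomposition: first materialize the succeeded
--     rounds, then compute each raw count with its own pass over that list.
--     """
--     n = len(obs["hist_president"])
--     rounds = [
--         (obs["hist_president"][i], obs["hist_chancellor"][i], obs["hist_policy"][i],
--          obs["hist_prez_claim"][i], obs["hist_chanc_claim"][i])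
--         for i in range(n) if obs["hist_succeeded"][i] == 1
--     ]
--
--     fasc_as_prez = sum(1 for (p, c, pol, _, _) in rounds if pol == 1 and p == player_idx)
--     fasc_as_chanc = sum(1 for (p, c, pol, _, _) in rounds if pol == 1 and c == player_idx)
--     lib_as_prez = sum(1 for (p, c, pol, _, _) in rounds if pol != 1 and p == player_idx)
--     lib_as_chanc = sum(1 for (p, c, pol, _, _) in rounds if pol != 1 and c == player_idx)
--
--     def conflict(row):
--         p, c, _, pc, cc = row
--         return (pc >= 0 and cc >= 0
--                 and (cc < max(0, pc - 1) or cc > min(2, pc))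
--                 and (p == player_idx or c == player_idx))
--
--     claim_conflicts = sum(1 for row in rounds if conflict(row))
--
--     return (
--         min(fasc_as_prez, 2),
--         min(fasc_as_chanc, 2),
--         min(lib_as_prez, 2),
--         min(lib_as_chanc, 2),
--         min(claim_conflicts, 1),
--     )
-- ===== Notes on version B (the rewrite author's own statement) =====
-- stated objective: alternative
-- what changed: Replaces A's single interleaved loop with mixed mutable counters by a filter of the succeeded rounds into a list of tuples followed by five independent counting passes (one per feature) over that list.
import Mathlib
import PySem

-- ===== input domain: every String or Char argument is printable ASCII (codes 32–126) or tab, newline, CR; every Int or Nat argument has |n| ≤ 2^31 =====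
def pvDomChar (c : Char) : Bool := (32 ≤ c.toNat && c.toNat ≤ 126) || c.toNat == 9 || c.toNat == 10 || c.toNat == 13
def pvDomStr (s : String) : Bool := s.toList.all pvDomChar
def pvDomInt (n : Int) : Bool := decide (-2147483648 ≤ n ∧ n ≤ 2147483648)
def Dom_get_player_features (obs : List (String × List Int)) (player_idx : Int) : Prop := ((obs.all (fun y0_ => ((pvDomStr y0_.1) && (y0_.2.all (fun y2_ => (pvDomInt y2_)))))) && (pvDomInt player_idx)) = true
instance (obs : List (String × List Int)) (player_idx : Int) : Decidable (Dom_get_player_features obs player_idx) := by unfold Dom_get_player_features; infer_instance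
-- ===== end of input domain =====

-- B replaces A's single interleaved loop by a filter of the succeeded rounds into a tuple list
-- followed by five independent counting passes (alternative decomposition, same cost).


-- obs["k"]: dict lookup; on Pre_ the key is present (getD [] is never hit there)
def pvGet? (obs : List (String × List Int)) (k : String) : Option (List Int) :=
  (obs.find? (fun p => p.1 == k)).map Prod.snd

def pvList (obs : List (String × List Int)) (k : String) : List Int :=
  (pvGet? obs k).getD []

-- xs[i]: on Pre_ the index is in range (getD 0 is never hit there)
def pvIdx (xs : List Int) (i : Int) : Int :=
  (PySem.List.pyGet? xs i).getD 0

-- ===== PORT A =====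
-- the body of A's for-loop, acting on the 5 counters
def pvStepA (obs : List (String × List Int)) (player_idx : Int)
    (s : Int × Int × Int × Int × Int) (i : Int) : Int × Int × Int × Int × Int :=
  let succeeded := pvIdx (pvList obs "hist_succeeded") i
  if succeeded ≠ 1 then s
  else
    let prez := pvIdx (pvList obs "hist_president") i
    let chanc := pvIdx (pvList obs "hist_chancellor") i
    let policy := pvIdx (pvList obs "hist_policy") i
    let prez_claim := pvIdx (pvList obs "hist_prez_claim") i
    let chanc_claim := pvIdx (pvList obs "hist_chanc_claim") i
    let (fp, fc, lp, lc, cf) := s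
    let (fp, fc, lp, lc) :=
      if policy = 1 then
        (if prez = player_idx then fp + 1 else fp,
         if chanc = player_idx then fc + 1 else fc, lp, lc)
      else
        (fp, fc,
         if prez = player_idx then lp + 1 else lp,
         if chanc = player_idx then lc + 1 else lc)
    let cf :=
      if 0 ≤ prez_claim ∧ 0 ≤ chanc_claim then
        let expected_min := max 0 (prez_claim - 1)
        let expected_max := min 2 prez_claim
        if chanc_claim < expected_min ∨ expected_max < chanc_claim then
          if prez = player_idx ∨ chanc = player_idx then cf + 1 else cf
        else cf
      else cf
    (fp, fc, lp, lc, cf)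

def get_player_features (obs : List (String × List Int)) (player_idx : Int) : Int × Int × Int × Int × Int :=
  let hist_len : Int := (pvList obs "hist_president").length
  let s := (PySem.List.pyRange 0 hist_len 1).foldl (pvStepA obs player_idx) (0, 0, 0, 0, 0)
  (min s.1 2, min s.2.1 2, min s.2.2.1 2, min s.2.2.2.1 2, min s.2.2.2.2 1)

-- ===== PORT B =====
-- one succeeded round: (prez, chanc, policy, prez_claim, chanc_claim)
def pvRow (obs : List (String × List Int)) (i : Int) : Int × Int × Int × Int × Int :=
  (pvIdx (pvList obs "hist_president") i, pvIdx (pvList obs "hist_chancellor") i,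
   pvIdx (pvList obs "hist_policy") i, pvIdx (pvList obs "hist_prez_claim") i,
   pvIdx (pvList obs "hist_chanc_claim") i)

def pvConflict (player_idx : Int) (r : Int × Int × Int × Int × Int) : Bool :=
  decide (0 ≤ r.2.2.2.1) && decide (0 ≤ r.2.2.2.2) &&
  (decide (r.2.2.2.2 < max 0 (r.2.2.2.1 - 1)) || decide (min 2 r.2.2.2.1 < r.2.2.2.2)) &&
  (decide (r.1 = player_idx) || decide (r.2.1 = player_idx))

def get_player_features_alt (obs : List (String × List Int)) (player_idx : Int) : Int × Int × Int × Int × Int :=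
  let n : Int := (pvList obs "hist_president").length
  let rounds := (PySem.List.pyRange 0 n 1).filterMap (fun i =>
    if pvIdx (pvList obs "hist_succeeded") i = 1 then some (pvRow obs i) else none)
  let fasc_as_prez : Int := (rounds.filter fun r => decide (r.2.2.1 = 1) && decide (r.1 = player_idx)).length
  let fasc_as_chanc : Int := (rounds.filter fun r => decide (r.2.2.1 = 1) && decide (r.2.1 = player_idx)).length
  let lib_as_prez : Int := (rounds.filter fun r => decide (r.2.2.1 ≠ 1) && decide (r.1 = player_idx)).length
  let lib_as_chanc : Int := (rounds.filter fun r => decide (r.2.2.1 ≠ 1) && decide (r.2.1 = player_idx)).length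
  let claim_conflicts : Int := (rounds.filter (pvConflict player_idx)).length
  (min fasc_as_prez 2, min fasc_as_chanc 2, min lib_as_prez 2, min lib_as_chanc 2, min claim_conflicts 1)

-- ===== PRECONDITION & SPEC =====
-- Pre_: exactly where Python A returns (no KeyError/IndexError): "hist_president" is present,
-- hist_succeeded covers its length, and every index of a succeeded round is in range of the other
-- four lists (a missing key reads as [], so the bounds also encode presence where A needs it).
def Pre_get_player_features (obs : List (String × List Int)) (player_idx : Int) : Prop :=
  (pvGet? obs "hist_president").isSome ∧
  (pvList obs "hist_president").length ≤ (pvList obs "hist_succeeded").length ∧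
  (∀ i : Nat, i < (pvList obs "hist_president").length →
    (pvList obs "hist_succeeded").getD i 0 = 1 →
      i < (pvList obs "hist_chancellor").length ∧
      i < (pvList obs "hist_policy").length ∧
      i < (pvList obs "hist_prez_claim").length ∧
      i < (pvList obs "hist_chanc_claim").length)

instance (obs : List (String × List Int)) (player_idx : Int) : Decidable (Pre_get_player_features obs player_idx) := by
  unfold Pre_get_player_features; infer_instance

def pvWitness_get_player_features : (List (String × List Int)) × Int :=
  ([("hist_president", [0, 1]), ("hist_chancellor", [1, 2]), ("hist_policy", [1, 0]),
    ("hist_prez_claim", [2, -1]), ("hist_chanc_claim", [0, -1]), ("hist_succeeded", [1, 1])], 1)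

def Spec_get_player_features (obs : List (String × List Int)) (player_idx : Int) (out : Int × Int × Int × Int × Int) : Prop := out = get_player_features_alt obs player_idx
instance (obs : List (String × List Int)) (player_idx : Int) (out : Int × Int × Int × Int × Int) : Decidable (Spec_get_player_features obs player_idx out) := by unfold Spec_get_player_features; infer_instance

-- ===== CLAIM (what is proved, stated in full; the proofs are below) =====
def Claim_equal_get_player_features : Prop := ∀ (obs : List (String × List Int)) (player_idx : Int), Dom_get_player_features obs player_idx → Pre_get_player_features obs player_idx → Spec_get_player_features obs player_idx (get_player_features obs player_idx)

-- ===== LEMMAS AND PROOFS =====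

-- pure-arithmetic shape of A's loop body (all history values abstracted as variables)
theorem pvStepArith (pid P C L PC CC fp fc lp lc cf : Int) :
    ((if L = 1 then (if P = pid then fp + 1 else fp, if C = pid then fc + 1 else fc, lp, lc)
      else (fp, fc, if P = pid then lp + 1 else lp, if C = pid then lc + 1 else lc)).1,
     (if L = 1 then (if P = pid then fp + 1 else fp, if C = pid then fc + 1 else fc, lp, lc)
      else (fp, fc, if P = pid then lp + 1 else lp, if C = pid then lc + 1 else lc)).2.1,
     (if L = 1 then (if P = pid then fp + 1 else fp, if C = pid then fc + 1 else fc, lp, lc)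
      else (fp, fc, if P = pid then lp + 1 else lp, if C = pid then lc + 1 else lc)).2.2.1,
     (if L = 1 then (if P = pid then fp + 1 else fp, if C = pid then fc + 1 else fc, lp, lc)
      else (fp, fc, if P = pid then lp + 1 else lp, if C = pid then lc + 1 else lc)).2.2.2,
     if 0 ≤ PC ∧ 0 ≤ CC then
       if CC < max 0 (PC - 1) ∨ min 2 PC < CC then
         if P = pid ∨ C = pid then cf + 1 else cf
       else cf
     else cf) =
    (fp + (if L = 1 ∧ P = pid then 1 else 0),
     fc + (if L = 1 ∧ C = pid then 1 else 0),
     lp + (if ¬L = 1 ∧ P = pid then 1 else 0),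
     lc + (if ¬L = 1 ∧ C = pid then 1 else 0),
     cf + (if pvConflict pid (P, C, L, PC, CC) then 1 else 0)) := by
  simp only [pvConflict, Bool.and_eq_true, Bool.or_eq_true, decide_eq_true_eq,
    lt_max_iff, min_lt_iff, Prod.mk.injEq]
  refine ⟨?_, ?_, ?_, ?_, ?_⟩ <;> split_ifs <;> simp_all

-- the one-step effect of A's loop body on a succeeded round, phrased as B's five predicates
theorem pvStepA_succeeded (obs : List (String × List Int)) (player_idx : Int)
    (s : Int × Int × Int × Int × Int) (i : Int)
    (h : pvIdx (pvList obs "hist_succeeded") i = 1) :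
    pvStepA obs player_idx s i =
      (s.1 + (if ((pvRow obs i).2.2.1 = 1 ∧ (pvRow obs i).1 = player_idx) then 1 else 0),
       s.2.1 + (if ((pvRow obs i).2.2.1 = 1 ∧ (pvRow obs i).2.1 = player_idx) then 1 else 0),
       s.2.2.1 + (if (¬(pvRow obs i).2.2.1 = 1 ∧ (pvRow obs i).1 = player_idx) then 1 else 0),
       s.2.2.2.1 + (if (¬(pvRow obs i).2.2.1 = 1 ∧ (pvRow obs i).2.1 = player_idx) then 1 else 0),
       s.2.2.2.2 + (if pvConflict player_idx (pvRow obs i) then 1 else 0)) := by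
  obtain ⟨fp, fc, lp, lc, cf⟩ := s
  simp only [pvStepA, pvRow, h, ne_eq, not_true_eq_false, if_false]
  exact pvStepArith player_idx (pvIdx (pvList obs "hist_president") i)
    (pvIdx (pvList obs "hist_chancellor") i) (pvIdx (pvList obs "hist_policy") i)
    (pvIdx (pvList obs "hist_prez_claim") i) (pvIdx (pvList obs "hist_chanc_claim") i)
    fp fc lp lc cf

-- loop invariant: folding A's step over any index list adds B's five counts over the filtered rounds
theorem pvLoop_eq (obs : List (String × List Int)) (player_idx : Int) :
    ∀ (l : List Int) (s : Int × Int × Int × Int × Int),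
    l.foldl (pvStepA obs player_idx) s =
      (let rounds := l.filterMap (fun i =>
          if pvIdx (pvList obs "hist_succeeded") i = 1 then some (pvRow obs i) else none)
       (s.1 + ((rounds.filter fun r => decide (r.2.2.1 = 1) && decide (r.1 = player_idx)).length : Int),
        s.2.1 + ((rounds.filter fun r => decide (r.2.2.1 = 1) && decide (r.2.1 = player_idx)).length : Int),
        s.2.2.1 + ((rounds.filter fun r => decide (r.2.2.1 ≠ 1) && decide (r.1 = player_idx)).length : Int),
        s.2.2.2.1 + ((rounds.filter fun r => decide (r.2.2.1 ≠ 1) && decide (r.2.1 = player_idx)).length : Int),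
        s.2.2.2.2 + ((rounds.filter (pvConflict player_idx)).length : Int))) := by
  intro l
  induction l with
  | nil => intro s; simp
  | cons i l ih =>
    intro s
    by_cases h : pvIdx (pvList obs "hist_succeeded") i = 1
    · simp only [List.foldl_cons, ih, List.filterMap_cons, h, if_pos, List.filter_cons,
        pvStepA_succeeded obs player_idx s i h, Bool.and_eq_true,
        decide_eq_true_eq, ne_eq]
      obtain ⟨fp, fc, lp, lc, cf⟩ := s
      simp only [Prod.mk.injEq]
      refine ⟨?_, ?_, ?_, ?_, ?_⟩ <;> (split_ifs <;> push_cast [List.length_cons] <;> omega)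
    · have h' : pvStepA obs player_idx s i = s := by
        simp [pvStepA, h]
      simp only [List.foldl_cons, h', ih, List.filterMap_cons, h, ite_false]

-- ===== VERDICT (by name: the statement is the Claim_ definition above) =====
theorem get_player_features_spec : Claim_equal_get_player_features := by
  intro obs player_idx _ _
  unfold Spec_get_player_features get_player_features get_player_features_alt
  simp only [pvLoop_eq, zero_add]
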